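-- pv_equiv track=rewrite | github.com/zara-shahid/Leetcode | 2511-maximum-enemy-forts-that-can-be-captured/2511-maximum-enemy-forts-that-can-be-captured.py | captureForts
-- ===== SOURCE A (Python) =====
-- from typing import List
--
-- def captureForts(forts: List[int]) -> int:
--     prev = None
--     prev_index = -1
--     max_capture = 0
--     for i in range(len(forts)):
--         if forts[i] == 1 or forts[i] == -1:
--             if prev is not None:
--                 if (prev == 1 and forts[i] == -1) or (prev == -1 and forts[i] == 1):
--                     zeros = i - prev_index - 1
--                     max_capture = max(max_capture, zeros)
--             prev = forts[i]
--             prev_index = i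
--     return max_capture
-- ===== SOURCE B (Python) =====
-- from typing import List
--
-- def captureForts(forts: List[int]) -> int:
--     # Run-length encode into (key, length) runs, key 1/-1 for forts, 0 for anything else;
--     # the answer is the longest interior 0-run whose neighbouring runs have different keys.
--     runs = []
--     for v in forts:
--         k = v if v == 1 or v == -1 else 0
--         if runs and runs[-1][0] == k:
--             runs[-1] = (k, runs[-1][1] + 1)
--         else:
--             runs.append((k, 1))
--     best = 0
--     for a, b, c in zip(runs, runs[1:], runs[2:]):
--         if b[0] == 0 and a[0] != c[0]:
--             best = max(best, b[1])
--     return best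
-- ===== Notes on version B (the rewrite author's own statement) =====
-- stated objective: alternative
-- what changed: B run-length-encodes the array into (key, length) runs and returns the max length of an interior zero-run whose two neighbouring runs have different keys, instead of A's single pass tracking the previous fort's value and index.
import Mathlib
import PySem

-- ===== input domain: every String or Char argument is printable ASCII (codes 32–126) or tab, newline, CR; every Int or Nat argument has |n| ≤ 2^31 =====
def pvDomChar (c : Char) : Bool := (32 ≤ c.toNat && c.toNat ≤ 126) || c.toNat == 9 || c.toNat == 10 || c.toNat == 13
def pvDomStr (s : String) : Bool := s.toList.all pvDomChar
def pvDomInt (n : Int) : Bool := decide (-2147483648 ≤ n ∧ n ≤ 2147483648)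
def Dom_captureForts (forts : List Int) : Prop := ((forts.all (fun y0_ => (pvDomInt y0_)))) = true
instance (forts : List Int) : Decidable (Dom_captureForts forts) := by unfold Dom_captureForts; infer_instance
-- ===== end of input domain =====

-- B replaces A's single stateful pass (previous fort value + index) by a run-length
-- encoding of the array into (key, length) runs followed by a scan of the interior
-- zero-runs; alternative decomposition, same asymptotic cost.

-- ===== PORT A =====
-- 'for i in range(len(forts)): … forts[i] …' ported as a fold over the indexed list
-- (exact: i is always in range); state = (prev, prev_index, max_capture)
def stepA (st : Option Int × Int × Int) (p : Int × Nat) : Option Int × Int × Int :=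
  if p.1 = 1 ∨ p.1 = -1 then
    (some p.1, ((p.2 : Int),
      if (st.1 = some 1 ∧ p.1 = -1) ∨ (st.1 = some (-1) ∧ p.1 = 1)
      then max st.2.2 ((p.2 : Int) - st.2.1 - 1) else st.2.2))
  else st

def captureForts (forts : List Int) : Int :=
  (forts.zipIdx.foldl stepA (none, -1, 0)).2.2

-- ===== PORT B =====
-- 'k = v if v == 1 or v == -1 else 0'
def runKey (v : Int) : Int := if v = 1 ∨ v = -1 then v else 0

-- the body of B's first loop: extend the last run or append a fresh one
def pushRun (runs : List (Int × Int)) (v : Int) : List (Int × Int) :=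
  let k := runKey v
  match runs.getLast? with
  | some last => if last.1 = k then runs.dropLast ++ [(k, last.2 + 1)] else runs ++ [(k, 1)]
  | none => [(k, 1)]

-- the body of B's second loop over zip(runs, runs[1:], runs[2:])
def stepB (best : Int) (t : (Int × Int) × (Int × Int) × (Int × Int)) : Int :=
  if t.2.1.1 = 0 ∧ t.1.1 ≠ t.2.2.1 then max best t.2.1.2 else best

def captureForts_alt (forts : List Int) : Int :=
  let runs := forts.foldl pushRun []
  (runs.zip (runs.tail.zip runs.tail.tail)).foldl stepB 0

-- ===== PRECONDITION & SPEC =====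
def Spec_captureForts (forts : List Int) (out : Int) : Prop := out = captureForts_alt forts
instance (forts : List Int) (out : Int) : Decidable (Spec_captureForts forts out) := by unfold Spec_captureForts; infer_instance

-- ===== CLAIM (what is proved, stated in full; the proofs are below) =====
def Claim_equal_captureForts : Prop := ∀ (forts : List Int), Dom_captureForts forts → Spec_captureForts forts (captureForts forts)

-- ===== LEMMAS AND PROOFS =====

-- head-recursive run-length encoding, used only in the proofs
def glue (r : Int × Int) (rs : List (Int × Int)) : List (Int × Int) :=
  match rs with
  | (k, c) :: t => if k = r.1 then (r.1, r.2 + c) :: t else r :: (k, c) :: t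
  | [] => [r]

def rleF : List Int → List (Int × Int)
  | [] => []
  | v :: t => glue (runKey v, 1) (rleF t)

-- right-recursive version of B's scan
def scan3 : List (Int × Int) → Int
  | a :: b :: c :: t => if b.1 = 0 ∧ a.1 ≠ c.1 then max b.2 (scan3 (b :: c :: t)) else scan3 (b :: c :: t)
  | _ => 0

-- right-recursive version of A's pass (max of the future contributions)
def specA : List (Int × Nat) → Option Int → Int → Int
  | [], _, _ => 0
  | (v, i) :: t, prev, pidx =>
    if v = 1 ∨ v = -1 then
      if (prev = some 1 ∧ v = -1) ∨ (prev = some (-1) ∧ v = 1) then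
        max ((i : Int) - pidx - 1) (specA t (some v) (i : Int))
      else specA t (some v) (i : Int)
    else specA t prev pidx

-- optional zero-run prefix used as context in the main induction
def pad (g : Int) (rs : List (Int × Int)) : List (Int × Int) :=
  if g = 0 then rs else glue (0, g) rs

theorem glue_glue_same (k c d : Int) (t : List (Int × Int)) :
    glue (k, c) (glue (k, d) t) = glue (k, c + d) t := by
  match t with
  | [] => simp [glue]
  | (k', c') :: t' =>
    by_cases h : k' = k
    · simp [glue, h, add_assoc]
    · simp [glue, h]

theorem glue_glue_ne (r : Int × Int) (k' d : Int) (t : List (Int × Int)) (h : r.1 ≠ k') :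
    glue r (glue (k', d) t) = r :: glue (k', d) t := by
  have h' : ¬ k' = r.1 := by omega
  match t with
  | [] => simp [glue, h']
  | (k2, c2) :: t' =>
    by_cases h2 : k2 = k'
    · simp [glue, h2, h']
    · simp [glue, h2, h']

theorem foldl_pushRun (l : List Int) : ∀ (rs : List (Int × Int)) (r : Int × Int),
    l.foldl pushRun (rs ++ [r]) = rs ++ glue r (rleF l) := by
  induction l with
  | nil => intro rs r; simp [rleF, glue]
  | cons v t ih =>
    intro rs r
    obtain ⟨rk, rc⟩ := r
    rw [List.foldl_cons]
    by_cases h : rk = runKey v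
    · have hp : pushRun (rs ++ [(rk, rc)]) v = rs ++ [(runKey v, rc + 1)] := by
        simp [pushRun, h]
      rw [hp, ih]
      show _ = rs ++ glue (rk, rc) (glue (runKey v, 1) (rleF t))
      rw [h, glue_glue_same]
    · have hp : pushRun (rs ++ [(rk, rc)]) v = (rs ++ [(rk, rc)]) ++ [(runKey v, 1)] := by
        simp [pushRun, h]
      rw [hp, ih]
      show _ = rs ++ glue (rk, rc) (glue (runKey v, 1) (rleF t))
      rw [glue_glue_ne _ _ _ _ h]
      simp


theorem foldl_pushRun_nil (l : List Int) : l.foldl pushRun [] = rleF l := by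
  match l with
  | [] => rfl
  | v :: t =>
    have hp : pushRun [] v = [] ++ [(runKey v, 1)] := rfl
    rw [List.foldl_cons, hp, foldl_pushRun]
    simp [rleF]

theorem scan3_nonneg : ∀ (l : List (Int × Int)), 0 ≤ scan3 l
  | a :: b :: c :: t => by
    have ih := scan3_nonneg (b :: c :: t)
    simp only [scan3]
    split
    · exact le_trans ih (le_max_right _ _)
    · exact ih
  | [] => le_refl 0
  | [a] => le_refl 0
  | [a, b] => le_refl 0

-- scan3 does not use the first run's length
theorem scan3_head_len (q c c' : Int) (t : List (Int × Int)) :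
    scan3 ((q, c) :: t) = scan3 ((q, c') :: t) := by
  match t with
  | [] => rfl
  | [b] => rfl
  | b :: d :: t => simp only [scan3]

theorem foldl_stepB : ∀ (l : List (Int × Int)) (m : Int), 0 ≤ m →
    ((l.zip (l.tail.zip l.tail.tail)).foldl stepB m) = max m (scan3 l)
  | [], m, hm => by simp [scan3, max_eq_left hm]
  | [a], m, hm => by simp [scan3, max_eq_left hm]
  | [a, b], m, hm => by simp [scan3, max_eq_left hm]
  | a :: b :: c :: t, m, hm => by
    have hz : ((a :: b :: c :: t).zip ((a :: b :: c :: t).tail.zip (a :: b :: c :: t).tail.tail))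
        = (a, (b, c)) :: ((b :: c :: t).zip ((b :: c :: t).tail.zip (b :: c :: t).tail.tail)) := by
      simp
    rw [hz, List.foldl_cons]
    have hm' : 0 ≤ stepB m (a, (b, c)) := by
      unfold stepB
      split
      · exact le_trans hm (le_max_left _ _)
      · exact hm
    rw [foldl_stepB (b :: c :: t) _ hm']
    simp only [stepB, scan3]
    split_ifs with h
    · rw [max_assoc]
    · rfl

theorem specA_nonneg : ∀ (l : List (Int × Nat)) (prev : Option Int) (pidx : Int), 0 ≤ specA l prev pidx
  | [], _, _ => le_refl 0
  | (v, i) :: t, prev, pidx => by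
    simp only [specA]
    split
    · split
      · exact le_trans (specA_nonneg t _ _) (le_max_right _ _)
      · exact specA_nonneg t _ _
    · exact specA_nonneg t _ _

theorem foldl_stepA : ∀ (l : List (Int × Nat)) (prev : Option Int) (pidx m : Int), 0 ≤ m →
    (l.foldl stepA (prev, pidx, m)).2.2 = max m (specA l prev pidx)
  | [], prev, pidx, m, hm => by simp [specA, max_eq_left hm]
  | (v, i) :: t, prev, pidx, m, hm => by
    rw [List.foldl_cons]
    simp only [stepA, specA]
    by_cases hf : v = 1 ∨ v = -1
    · simp only [if_pos hf]
      by_cases hc : (prev = some 1 ∧ v = -1) ∨ (prev = some (-1) ∧ v = 1)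
      · simp only [if_pos hc]
        rw [foldl_stepA t _ _ _ (le_trans hm (le_max_left _ _))]
        rw [max_assoc]
      · simp only [if_neg hc]
        exact foldl_stepA t _ _ _ hm
    · simp only [if_neg hf]
      exact foldl_stepA t _ _ _ hm

theorem pad_glue_zero (g : Int) (rs : List (Int × Int)) (hg : 0 ≤ g) :
    pad g (glue (0, 1) rs) = pad (g + 1) rs := by
  unfold pad
  by_cases h0 : g = 0
  · subst h0; norm_num
  · have h1 : ¬ (g + 1 = 0) := by omega
    rw [if_neg h0, if_neg h1, glue_glue_same]

theorem scan3_skip (a b : Int × Int) (l : List (Int × Int)) (hb : ¬ b.1 = 0) :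
    scan3 (a :: b :: l) = scan3 (b :: l) := by
  match l with
  | [] => rfl
  | c :: t => simp [scan3, hb]

theorem scan3_zstep (a c : Int × Int) (g : Int) (l : List (Int × Int)) :
    scan3 (a :: (0, g) :: c :: l)
      = if a.1 ≠ c.1 then max g (scan3 ((0, g) :: c :: l)) else scan3 ((0, g) :: c :: l) := by
  by_cases h : a.1 = c.1 <;> simp [scan3, h]

theorem pad_zero (rs : List (Int × Int)) : pad 0 rs = rs := by simp [pad]

theorem pad_ne (g : Int) (rs : List (Int × Int)) (h0 : ¬ g = 0) : pad g rs = glue (0, g) rs := by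
  simp [pad, h0]

theorem glue_cons_same (k c k' c' : Int) (t : List (Int × Int)) (h : k' = k) :
    glue (k, c) ((k', c') :: t) = (k, c + c') :: t := by simp [glue, h]

theorem glue_cons_ne (k c k' c' : Int) (t : List (Int × Int)) (h : ¬ k' = k) :
    glue (k, c) ((k', c') :: t) = (k, c) :: (k', c') :: t := by simp [glue, h]

theorem scan3_glue_zero (rs : List (Int × Int)) :
    scan3 (glue (0, 1) rs) = scan3 rs := by
  match rs with
  | [] => rfl
  | (k', c') :: t' =>
    by_cases h : k' = 0
    · subst h
      rw [glue_cons_same 0 1 0 c' t' rfl]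
      exact scan3_head_len 0 (1 + c') c' t'
    · simp only [glue, if_neg h]
      match t' with
      | [] => rfl
      | [d] => simp [scan3, h]
      | d :: e :: t2 => simp [scan3, h]

theorem scan3_glue_fort (k : Int) (rs : List (Int × Int)) (hk0 : ¬ k = 0) :
    scan3 (glue (k, 1) rs) = scan3 ((k, 1) :: rs) := by
  match rs with
  | [] => rfl
  | (k', c') :: t' =>
    by_cases h : k' = k
    · rw [glue_cons_same k 1 k' c' t' h, h]
      match t' with
      | [] => rfl
      | d :: t2 =>
        have h1 : scan3 ((k, 1) :: (k, c') :: d :: t2) = scan3 ((k, c') :: d :: t2) := by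
          simp [scan3, hk0]
        rw [h1, scan3_head_len k (1 + c') c' (d :: t2)]
    · simp only [glue, if_neg h]

theorem scan3_same (k g : Int) (rs : List (Int × Int)) (hk : k = 1 ∨ k = -1) (_hg : 0 ≤ g) :
    scan3 ((k, 1) :: pad g (glue (k, 1) rs)) = scan3 ((k, 1) :: rs) := by
  have hk0 : ¬ k = 0 := by rcases hk with h | h <;> omega
  match rs with
  | [] =>
    show scan3 ((k, 1) :: pad g [(k, 1)]) = scan3 [(k, 1)]
    by_cases h0 : g = 0
    · rw [h0, pad_zero]; rfl
    · rw [pad_ne g _ h0, glue_cons_ne 0 g k 1 [] hk0,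
          scan3_zstep (k, 1) (k, 1) g []]
      simp [scan3]
  | (k', c') :: t' =>
    by_cases h : k' = k
    · rw [glue_cons_same k 1 k' c' t' h, h]
      by_cases h0 : g = 0
      · rw [h0, pad_zero, scan3_skip _ _ _ hk0, scan3_head_len k (1 + c') c',
            ← scan3_skip (k, 1) (k, c') t' hk0]
      · rw [pad_ne g _ h0, glue_cons_ne 0 g k (1 + c') t' hk0,
            scan3_zstep (k, 1) (k, 1 + c') g t']
        rw [if_neg (by simp)]
        rw [scan3_skip (0, g) (k, 1 + c') t' hk0, scan3_head_len k (1 + c') c',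
            ← scan3_skip (k, 1) (k, c') t' hk0]
    · rw [glue_cons_ne k 1 k' c' t' h]
      by_cases h0 : g = 0
      · rw [h0, pad_zero, scan3_skip (k, 1) (k, 1) ((k', c') :: t') hk0]
      · rw [pad_ne g _ h0, glue_cons_ne 0 g k 1 ((k', c') :: t') hk0,
            scan3_zstep (k, 1) (k, 1) g ((k', c') :: t')]
        rw [if_neg (by simp)]
        rw [scan3_skip (0, g) (k, 1) ((k', c') :: t') hk0]

theorem scan3_opp (k g : Int) (rs : List (Int × Int)) (hk : k = 1 ∨ k = -1) (_hg : 0 ≤ g) :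
    scan3 ((k, 1) :: pad g (glue (-k, 1) rs)) = max g (scan3 ((-k, 1) :: rs)) := by
  have hk0 : ¬ k = 0 := by rcases hk with h | h <;> omega
  have hnk0 : ¬ (-k) = 0 := by rcases hk with h | h <;> omega
  have hne : ¬ k = -k := by rcases hk with h | h <;> omega
  have core : scan3 (glue (-k, 1) rs) = scan3 ((-k, 1) :: rs) := scan3_glue_fort (-k) rs hnk0
  by_cases h0 : g = 0
  · rw [h0, pad_zero]
    have h1 : scan3 ((k, 1) :: glue (-k, 1) rs) = scan3 (glue (-k, 1) rs) := by
      match rs with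
      | [] => exact scan3_skip _ _ _ hnk0
      | (k2, c2) :: t2 =>
        by_cases h2 : k2 = -k
        · rw [glue_cons_same (-k) 1 k2 c2 t2 h2]; exact scan3_skip _ _ _ hnk0
        · rw [glue_cons_ne (-k) 1 k2 c2 t2 h2]; exact scan3_skip _ _ _ hnk0
    rw [h1, core, max_eq_right (scan3_nonneg _)]
  · rw [pad_ne g _ h0]
    match rs with
    | [] =>
      show scan3 ((k, 1) :: glue (0, g) [(-k, 1)]) = _
      rw [glue_cons_ne 0 g (-k) 1 [] hnk0, scan3_zstep (k, 1) (-k, 1) g []]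
      rw [if_pos (by simpa using hne)]
      rw [scan3_skip (0, g) (-k, 1) [] hnk0]
    | (k2, c2) :: t2 =>
      by_cases h2 : k2 = -k
      · rw [glue_cons_same (-k) 1 k2 c2 t2 h2, glue_cons_ne 0 g (-k) (1 + c2) t2 hnk0,
            scan3_zstep (k, 1) (-k, 1 + c2) g t2]
        rw [if_pos (by simpa using hne)]
        rw [scan3_skip (0, g) (-k, 1 + c2) t2 hnk0, scan3_head_len (-k) (1 + c2) c2,
            ← h2, ← scan3_skip (-k, 1) (k2, c2) t2 (h2 ▸ hnk0)]
        rw [h2]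
      · rw [glue_cons_ne (-k) 1 k2 c2 t2 h2, glue_cons_ne 0 g (-k) 1 ((k2, c2) :: t2) hnk0,
            scan3_zstep (k, 1) (-k, 1) g ((k2, c2) :: t2)]
        rw [if_pos (by simpa using hne)]
        rw [scan3_skip (0, g) (-k, 1) ((k2, c2) :: t2) hnk0]

theorem specA_some : ∀ (l : List Int) (n : Nat) (k g : Int), (k = 1 ∨ k = -1) → 0 ≤ g →
    specA (l.zipIdx n) (some k) ((n : Int) - 1 - g) = scan3 ((k, 1) :: pad g (rleF l))
  | [], n, k, g, hk, hg => by
    show (0 : Int) = scan3 ((k, 1) :: pad g [])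
    by_cases h0 : g = 0
    · rw [h0, pad_zero]; rfl
    · rw [pad_ne g _ h0]; rfl
  | v :: t, n, k, g, hk, hg => by
    rw [List.zipIdx_cons]
    show specA ((v, n) :: t.zipIdx (n + 1)) (some k) ((n : Int) - 1 - g) = _
    by_cases hf : v = 1 ∨ v = -1
    · have hkey : runKey v = v := by simp [runKey, hf]
      by_cases hv : v = -k
      · have hcond : ((some k = some (1:Int) ∧ v = -1) ∨ (some k = some (-1:Int) ∧ v = 1)) := by
          rcases hk with h | h <;> simp [h, hv]
        simp only [specA, if_pos hf, if_pos hcond]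
        have harith : ((n : Int) - ((n : Int) - 1 - g) - 1) = g := by ring
        have hrec : specA (t.zipIdx (n + 1)) (some v) ((n : Int))
            = scan3 ((v, 1) :: pad 0 (rleF t)) := by
          have h := specA_some t (n + 1) v 0 hf le_rfl
          have : ((n + 1 : Nat) : Int) - 1 - 0 = (n : Int) := by push_cast; ring
          rwa [this] at h
        rw [harith, hrec, pad_zero,
            show rleF (v :: t) = glue (runKey v, 1) (rleF t) from rfl, hkey, hv]
        exact (scan3_opp k g (rleF t) hk hg).symm
      · have hvk : v = k := by rcases hk with h | h <;> rcases hf with h2 | h2 <;> omega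
        have hcond : ¬ ((some k = some (1:Int) ∧ v = -1) ∨ (some k = some (-1:Int) ∧ v = 1)) := by
          rcases hk with h | h <;> simp [h] <;> omega
        simp only [specA, if_pos hf, if_neg hcond]
        have hrec : specA (t.zipIdx (n + 1)) (some v) ((n : Int))
            = scan3 ((v, 1) :: pad 0 (rleF t)) := by
          have h := specA_some t (n + 1) v 0 hf le_rfl
          have : ((n + 1 : Nat) : Int) - 1 - 0 = (n : Int) := by push_cast; ring
          rwa [this] at h
        rw [hrec, pad_zero,
            show rleF (v :: t) = glue (runKey v, 1) (rleF t) from rfl, hkey, hvk]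
        exact (scan3_same k g (rleF t) hk hg).symm
    · have hkey : runKey v = 0 := by simp [runKey, hf]
      simp only [specA, if_neg hf]
      have harith : ((n : Int) - 1 - g) = (((n + 1 : Nat) : Int) - 1 - (g + 1)) := by
        push_cast; ring
      rw [harith, specA_some t (n + 1) k (g + 1) hk (by omega)]
      rw [show rleF (v :: t) = glue (runKey v, 1) (rleF t) from rfl, hkey,
          pad_glue_zero g (rleF t) hg]

theorem specA_none : ∀ (l : List Int) (n : Nat) (pidx : Int),
    specA (l.zipIdx n) none pidx = scan3 (rleF l)
  | [], n, pidx => rfl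
  | v :: t, n, pidx => by
    rw [List.zipIdx_cons]
    show specA ((v, n) :: t.zipIdx (n + 1)) none pidx = _
    by_cases hf : v = 1 ∨ v = -1
    · have hkey : runKey v = v := by simp [runKey, hf]
      have hv0 : ¬ v = 0 := by rcases hf with h | h <;> omega
      have hcond : ¬ (((none : Option Int) = some 1 ∧ v = -1) ∨ ((none : Option Int) = some (-1) ∧ v = 1)) := by
        simp
      simp only [specA, if_pos hf, if_neg hcond]
      have hrec : specA (t.zipIdx (n + 1)) (some v) ((n : Int))
          = scan3 ((v, 1) :: pad 0 (rleF t)) := by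
        have h := specA_some t (n + 1) v 0 hf le_rfl
        have : ((n + 1 : Nat) : Int) - 1 - 0 = (n : Int) := by push_cast; ring
        rwa [this] at h
      rw [hrec, pad_zero]
      rw [show rleF (v :: t) = glue (runKey v, 1) (rleF t) from rfl, hkey]
      exact (scan3_glue_fort v (rleF t) hv0).symm
    · have hkey : runKey v = 0 := by simp [runKey, hf]
      simp only [specA, if_neg hf]
      rw [specA_none t (n + 1) pidx]
      rw [show rleF (v :: t) = glue (runKey v, 1) (rleF t) from rfl, hkey]
      exact (scan3_glue_zero (rleF t)).symm

-- ===== VERDICT (by name: the statement is the Claim_ definition above) =====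
theorem captureForts_spec : Claim_equal_captureForts := by
  intro forts _
  unfold Spec_captureForts captureForts captureForts_alt
  rw [foldl_stepA _ _ _ _ le_rfl, foldl_pushRun_nil,
      foldl_stepB _ _ le_rfl, specA_none]
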